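-- pv_equiv track=rewrite | github.com/nvidia-cosmos/cosmos-transfer1 | cosmos_transfer1/utils/combined_gif.py | get_best_grid
-- ===== SOURCE A (Python) =====
-- import math
-- from typing import Tuple
--
-- def get_best_grid(n: int) -> Tuple[int, int]:
--     # Find the grid (rows, cols) closest to square for n videos
--     best_r, best_c = 1, n
--     min_diff = n
--     for r in range(1, n + 1):
--         c = math.ceil(n / r)
--         if r * c >= n:
--             diff = abs(r - c)
--             if diff < min_diff:
--                 min_diff = diff
--                 best_r, best_c = r, c
--     return best_r, best_c
-- ===== SOURCE B (Python) =====
-- import math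
--
-- def get_best_grid(n):
--     # Only rows near sqrt(n) can minimize |rows - ceil(n/rows)|:
--     # the difference strictly decreases up to isqrt(n) and never
--     # decreases afterwards, so compare isqrt(n) and isqrt(n)+1.
--     if n <= 1:
--         return (1, n)
--     r0 = math.isqrt(n)
--     c0 = -(-n // r0)
--     r1 = r0 + 1
--     c1 = -(-n // r1)
--     if c0 - r0 <= r1 - c1:
--         return (r0, c0)
--     return (r1, c1)
-- ===== Notes on version B (the rewrite author's own statement) =====
-- stated objective: faster
-- what changed: Instead of scanning every r in 1..n and tracking the minimum of |r - ceil(n/r)|, B evaluates only the two candidates isqrt(n) and isqrt(n)+1, since the difference is strictly decreasing up to isqrt(n) and nondecreasing after it.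
import Mathlib
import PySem

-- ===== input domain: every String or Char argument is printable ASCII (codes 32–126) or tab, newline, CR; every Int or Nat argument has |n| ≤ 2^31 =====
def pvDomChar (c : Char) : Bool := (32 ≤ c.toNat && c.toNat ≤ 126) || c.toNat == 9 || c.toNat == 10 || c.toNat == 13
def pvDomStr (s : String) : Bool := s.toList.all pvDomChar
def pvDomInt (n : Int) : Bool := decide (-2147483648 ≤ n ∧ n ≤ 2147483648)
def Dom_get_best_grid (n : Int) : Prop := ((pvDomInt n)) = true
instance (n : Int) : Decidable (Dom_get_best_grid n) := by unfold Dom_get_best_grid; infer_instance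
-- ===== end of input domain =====

-- B replaces A's scan of every r in 1..n by an O(1) check of the two rows isqrt(n) and isqrt(n)+1 (objective: faster).

-- ===== PORT A =====
-- math.ceil(n / r): Python computes a float true division then ceils it; for |n| ≤ 2^31 and
-- 1 ≤ r the float result is close enough that the ceil equals exact integer ceiling division,
-- ported as -((-n) // r).
def pyCeilA (n r : Int) : Int := -(PySem.Int.floordiv (-n) r)

-- the body of A's `for r in range(1, n+1)` loop; state = (best_r, best_c, min_diff)
def stepA (n : Int) (st : Int × Int × Int) (r : Int) : Int × Int × Int :=
  let c := pyCeilA n r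
  if n ≤ r * c then
    let diff := |r - c|
    if diff < st.2.2 then (r, c, diff) else st
  else st

def get_best_grid (n : Int) : Int × Int :=
  let st := (PySem.List.pyRange 1 (n + 1) 1).foldl (stepA n) (1, n, n)
  (st.1, st.2.1)

-- ===== PORT B =====
def get_best_grid_alt (n : Int) : Int × Int :=
  if n ≤ 1 then (1, n)
  else
    let r0 : Int := (Nat.sqrt n.toNat : Int)     -- math.isqrt(n)
    let c0 : Int := -(PySem.Int.floordiv (-n) r0) -- -(-n // r0)
    let r1 : Int := r0 + 1
    let c1 : Int := -(PySem.Int.floordiv (-n) r1)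
    if c0 - r0 ≤ r1 - c1 then (r0, c0) else (r1, c1)

-- ===== PRECONDITION & SPEC =====
def Spec_get_best_grid (n : Int) (out : Int × Int) : Prop := out = get_best_grid_alt n
instance (n : Int) (out : Int × Int) : Decidable (Spec_get_best_grid n out) := by unfold Spec_get_best_grid; infer_instance

-- ===== CLAIM (what is proved, stated in full; the proofs are below) =====
def Claim_equal_get_best_grid : Prop := ∀ (n : Int), Dom_get_best_grid n → Spec_get_best_grid n (get_best_grid n)

-- ===== LEMMAS AND PROOFS =====

-- the quantity A minimizes
def dv (n r : Int) : Int := |r - pyCeilA n r|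

-- characterisation of ceiling division
theorem pyCeilA_char (n : Int) {r : Int} (hr : 0 < r) :
    (pyCeilA n r - 1) * r < n ∧ n ≤ pyCeilA n r * r := by
  have := (PySem.Int.neg_floordiv_neg_eq_iff_of_pos (a := n) (b := r)
    (q := pyCeilA n r) hr).mp rfl
  exact this

theorem pyCeilA_le (n : Int) {r : Int} (hr : 0 < r) (h : n ≤ r * r) : pyCeilA n r ≤ r := by
  have h1 := (pyCeilA_char n hr).1
  nlinarith [h1]

theorem le_pyCeilA (n : Int) {r : Int} (hr : 0 < r) (h : r * r ≤ n) : r ≤ pyCeilA n r := by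
  have h2 := (pyCeilA_char n hr).2
  nlinarith [h2]

theorem pyCeilA_anti (n : Int) {r s : Int} (hr : 0 < r) (hrs : r ≤ s) (hn : 1 ≤ n) :
    pyCeilA n s ≤ pyCeilA n r := by
  have hs : 0 < s := lt_of_lt_of_le hr hrs
  have h2 := (pyCeilA_char n hr).2
  have h1 := (pyCeilA_char n hs).1
  have hc : 1 ≤ pyCeilA n r := by nlinarith
  nlinarith

theorem dv_eq_left (n : Int) {r : Int} (hr : 0 < r) (h : r * r ≤ n) :
    dv n r = pyCeilA n r - r := by
  have h' := le_pyCeilA n hr h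
  unfold dv
  rw [abs_sub_comm, abs_of_nonneg (by omega)]

theorem dv_eq_right (n : Int) {r : Int} (hr : 0 < r) (h : n ≤ r * r) :
    dv n r = r - pyCeilA n r := by
  have h' := pyCeilA_le n hr h
  unfold dv
  rw [abs_of_nonneg (by omega)]

-- strictly decreasing up to the square root
theorem dv_strict_dec (n : Int) {r : Int} (hr : 0 < r) (h : (r + 1) * (r + 1) ≤ n) :
    dv n (r + 1) < dv n r := by
  have hn : 1 ≤ n := by nlinarith
  have hrr : r * r ≤ n := by nlinarith
  have hanti := pyCeilA_anti n hr (show r ≤ r + 1 by omega) hn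
  rw [dv_eq_left n hr hrr, dv_eq_left n (show (0:Int) < r + 1 by omega) h]
  linarith [hanti]

-- nondecreasing past the square root (one step)
theorem dv_mono_step (n : Int) {r : Int} (hr : 0 < r) (h : n ≤ r * r) (hn : 1 ≤ n) :
    dv n r ≤ dv n (r + 1) := by
  have hr1 : (0:Int) < r + 1 := by omega
  have h1 : n ≤ (r + 1) * (r + 1) := by nlinarith
  have hanti := pyCeilA_anti n hr (show r ≤ r + 1 by omega) hn
  rw [dv_eq_right n hr h, dv_eq_right n hr1 h1]
  linarith [hanti]

-- nondecreasing past the square root (many steps)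
theorem dv_mono (n : Int) {r : Int} (hr : 0 < r) (h : n ≤ r * r) (hn : 1 ≤ n) :
    ∀ m : Nat, dv n r ≤ dv n (r + m) := by
  intro m
  induction m with
  | zero => simp
  | succ k ih =>
      have hrk : 0 < r + (k : Int) := by positivity
      have hk : n ≤ (r + (k : Int)) * (r + (k : Int)) := by nlinarith
      have := dv_mono_step n hrk hk hn
      have heq : r + ((k : Int) + 1) = (r + (k : Int)) + 1 := by ring
      push_cast
      rw [heq]
      omega

-- a step that changes nothing, over a whole list
theorem foldl_fix {α β : Type} (f : α → β → α) (st : α) :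
    ∀ l : List β, (∀ x ∈ l, f st x = st) → l.foldl f st = st := by
  intro l
  induction l with
  | nil => intro _; rfl
  | cons a t ih =>
      intro h
      simp only [List.foldl_cons, h a (by simp)]
      exact ih (fun x hx => h x (by simp [hx]))

-- the guard r*c >= n is always true
theorem stepA_eval (n : Int) (st : Int × Int × Int) {r : Int} (hr : 0 < r) :
    stepA n st r = if dv n r < st.2.2 then (r, pyCeilA n r, dv n r) else st := by
  have h2 := (pyCeilA_char n hr).2
  unfold stepA dv
  rw [if_pos (by nlinarith)]

-- Phase 1: folding 1..k while k ≤ isqrt n tracks (k, ceil(n/k), dv n k)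
theorem phase1 (n r0 : Int) (hn : 2 ≤ n) (hr0 : 1 ≤ r0) (hsq : r0 * r0 ≤ n) :
    ∀ k : Nat, 1 ≤ k → (k : Int) ≤ r0 →
      (PySem.List.pyRange 1 ((k : Int) + 1) 1).foldl (stepA n) (1, n, n)
        = ((k : Int), pyCeilA n (k : Int), dv n (k : Int)) := by
  intro k hk1
  induction k, hk1 using Nat.le_induction with
  | base =>
      intro _
      have hc1 : pyCeilA n 1 = n := by
        have h := pyCeilA_char n (show (0:Int) < 1 by norm_num)
        simp only [mul_one] at h
        omega
      have hd1 : dv n 1 = n - 1 := by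
        unfold dv
        rw [hc1, abs_of_nonpos (by omega)]
        ring
      rw [show ((1:Nat):Int) + 1 = 1 + 1 by norm_num, PySem.List.pyRange_one_singleton]
      simp only [List.foldl_cons, List.foldl_nil]
      rw [stepA_eval n _ (by norm_num : (0:Int) < 1), hd1, hc1]
      simp only [Nat.cast_one]
      rw [hc1, hd1, if_pos (by omega)]
  | succ k hk ih =>
      intro hkr
      have hkr1 : (k : Int) + 1 ≤ r0 := by push_cast at hkr; omega
      have hk0 : (0:Int) < (k : Int) := by exact_mod_cast hk
      have hk' : (k : Int) ≤ r0 := by omega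
      have hsplit : PySem.List.pyRange 1 ((((k:Nat) + 1 : Nat) : Int) + 1) 1
          = PySem.List.pyRange 1 ((k : Int) + 1) 1 ++ [(k : Int) + 1] := by
        push_cast
        exact PySem.List.pyRange_one_succ_right (by omega)
      rw [hsplit, List.foldl_append, ih hk']
      simp only [List.foldl_cons, List.foldl_nil]
      rw [stepA_eval n _ (show (0:Int) < (k:Int) + 1 by omega)]
      have hsq' : ((k:Int) + 1) * ((k:Int) + 1) ≤ n := by
        have := mul_le_mul hkr1 hkr1 (by omega : (0:Int) ≤ (k:Int) + 1) (by omega : (0:Int) ≤ r0)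
        linarith
      have hstep : dv n ((k : Int) + 1) < dv n (k : Int) := dv_strict_dec n hk0 hsq'
      rw [if_pos (by exact hstep)]
      push_cast
      rfl

-- Phase 3: past isqrt n + 1 the state never changes
theorem phase3 (n r0 : Int) (hn : 2 ≤ n) (hr0 : 1 ≤ r0) (hsq2 : n ≤ (r0 + 1) * (r0 + 1))
    (st : Int × Int × Int) (hst : st.2.2 ≤ dv n (r0 + 1)) :
    (PySem.List.pyRange (r0 + 2) (n + 1) 1).foldl (stepA n) st = st := by
  apply foldl_fix
  intro r hrmem
  rw [PySem.List.mem_pyRange_one] at hrmem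
  have hr : 0 < r := by omega
  rw [stepA_eval n st hr]
  have hmono : dv n (r0 + 1) ≤ dv n r := by
    have h := dv_mono n (show (0:Int) < r0 + 1 by omega) hsq2 (by omega) (r - (r0 + 1)).toNat
    rwa [show r0 + 1 + ((r - (r0 + 1)).toNat : Int) = r by omega] at h
  rw [if_neg (by omega)]

-- Phase 1 with an Int index
theorem phase1' (n r0 : Int) (hn : 2 ≤ n) (hr0 : 1 ≤ r0) (hsq : r0 * r0 ≤ n)
    (k : Int) (h1 : 1 ≤ k) (h2 : k ≤ r0) :
    (PySem.List.pyRange 1 (k + 1) 1).foldl (stepA n) (1, n, n)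
      = (k, pyCeilA n k, dv n k) := by
  have h := phase1 n r0 hn hr0 hsq k.toNat (by omega) (by omega)
  rwa [Int.toNat_of_nonneg (by omega : (0:Int) ≤ k)] at h

-- ===== VERDICT (by name: the statement is the Claim_ definition above) =====
theorem get_best_grid_spec : Claim_equal_get_best_grid := by
  intro n _
  unfold Spec_get_best_grid
  by_cases hn1 : n ≤ 1
  · by_cases hn0 : n ≤ 0
    · -- empty loop: A returns (1, n); B returns (1, n)
      unfold get_best_grid get_best_grid_alt
      rw [PySem.List.pyRange_one_eq_nil (by omega), if_pos hn1]
      rfl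
    · -- n = 1
      have h1 : n = 1 := by omega
      subst h1
      decide
  · -- 2 ≤ n : compare the two candidate rows around the square root
    have hn2 : 2 ≤ n := by omega
    set r0 : Int := (Nat.sqrt n.toNat : Int) with hr0def
    have hNn : ((n.toNat : Int)) = n := Int.toNat_of_nonneg (by omega)
    have hr0 : 1 ≤ r0 := by
      have h := Nat.sqrt_pos.mpr (show 0 < n.toNat by omega)
      omega
    have hsq : r0 * r0 ≤ n := by
      have h0 : n.toNat.sqrt * n.toNat.sqrt ≤ n.toNat := by
        simpa [pow_two] using Nat.sqrt_le' n.toNat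
      have h : (r0 * r0 : Int) ≤ ((n.toNat : Int)) := by rw [hr0def]; exact_mod_cast h0
      omega
    have hsq2 : n < (r0 + 1) * (r0 + 1) := by
      have h0 : n.toNat < (n.toNat.sqrt + 1) * (n.toNat.sqrt + 1) := by
        simpa [pow_two, Nat.succ_eq_add_one] using Nat.lt_succ_sqrt' n.toNat
      have h : ((n.toNat : Int)) < (r0 + 1) * (r0 + 1) := by rw [hr0def]; exact_mod_cast h0
      omega
    have hlt : r0 < n := by
      have h : Nat.sqrt n.toNat < n.toNat := Nat.sqrt_lt_self (by omega)
      omega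
    have hd0 : dv n r0 = pyCeilA n r0 - r0 := dv_eq_left n (by omega) hsq
    have hd1 : dv n (r0 + 1) = (r0 + 1) - pyCeilA n (r0 + 1) :=
      dv_eq_right n (by omega) (le_of_lt hsq2)
    -- split the loop range at r0+1 and r0+2
    have hsplit1 : PySem.List.pyRange 1 (n + 1) 1
        = PySem.List.pyRange 1 (r0 + 1) 1
          ++ (PySem.List.pyRange (r0 + 1) (r0 + 2) 1 ++ PySem.List.pyRange (r0 + 2) (n + 1) 1) := by
      rw [← PySem.List.pyRange_one_append (r0 + 1) (r0 + 2) (n + 1) (by omega) (by omega),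
          ← PySem.List.pyRange_one_append 1 (r0 + 1) (n + 1) (by omega) (by omega)]
    have hmid : PySem.List.pyRange (r0 + 1) (r0 + 2) 1 = [r0 + 1] := by
      rw [show r0 + 2 = (r0 + 1) + 1 by ring]
      exact PySem.List.pyRange_one_singleton (r0 + 1)
    have hfold1 := phase1' n r0 hn2 hr0 hsq r0 hr0 le_rfl
    have hB : get_best_grid_alt n
        = if pyCeilA n r0 - r0 ≤ r0 + 1 - pyCeilA n (r0 + 1)
          then (r0, pyCeilA n r0) else (r0 + 1, pyCeilA n (r0 + 1)) := by
      unfold get_best_grid_alt pyCeilA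
      rw [if_neg hn1]
    unfold get_best_grid
    rw [hsplit1, List.foldl_append, hfold1, List.foldl_append, hmid]
    simp only [List.foldl_cons, List.foldl_nil]
    rw [stepA_eval n _ (show (0:Int) < r0 + 1 by omega)]
    by_cases hcmp : dv n (r0 + 1) < (r0, pyCeilA n r0, dv n r0).2.2
    · rw [if_pos hcmp]
      rw [phase3 n r0 hn2 hr0 (le_of_lt hsq2) _ (le_refl (dv n (r0 + 1)))]
      rw [hB, if_neg (by simp only [] at hcmp; omega)]
    · rw [if_neg hcmp]
      rw [phase3 n r0 hn2 hr0 (le_of_lt hsq2) _ (by simp only [] at hcmp ⊢; omega)]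
      rw [hB, if_pos (by simp only [] at hcmp; omega)]
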